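-- pv_equiv track=rewrite | github.com/mayuresh-shandilya/IR-Assignment-2 | 21111041-assignment2/Question_1.py | thresgd
-- ===== SOURCE A (Python) =====
-- def thresgd(ground):
--     thrld=[]
--     thrlst=['4','5','6','7','8']
--     for i in ground:
--         eachthr=[]
--         for j in thrlst:
--             if i>=j:
--                 eachthr.append(1)
--             else:
--                 eachthr.append(0)
--         thrld.append(eachthr)
--     return thrld
-- ===== SOURCE B (Python) =====
-- def thresgd(ground):
--     thrlst = ['4', '5', '6', '7', '8']
--     thrld = []
--     for i in ground:
--         # binary search: lo ends as the number of thresholds <= i (bisect_right)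
--         lo, hi = 0, 5
--         while lo < hi:
--             mid = (lo + hi) // 2
--             if i >= thrlst[mid]:
--                 lo = mid + 1
--             else:
--                 hi = mid
--         thrld.append([1] * lo + [0] * (5 - lo))
--     return thrld
-- ===== Notes on version B (the rewrite author's own statement) =====
-- stated objective: alternative
-- what changed: Instead of testing the element against each of the five thresholds and appending a 1/0 per comparison, B binary-searches the sorted threshold list for the cutoff k (bisect_right by hand) and constructs the row as [1]*k + [0]*(5-k), relying on the monotone run-of-ones shape.
import Mathlib
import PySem

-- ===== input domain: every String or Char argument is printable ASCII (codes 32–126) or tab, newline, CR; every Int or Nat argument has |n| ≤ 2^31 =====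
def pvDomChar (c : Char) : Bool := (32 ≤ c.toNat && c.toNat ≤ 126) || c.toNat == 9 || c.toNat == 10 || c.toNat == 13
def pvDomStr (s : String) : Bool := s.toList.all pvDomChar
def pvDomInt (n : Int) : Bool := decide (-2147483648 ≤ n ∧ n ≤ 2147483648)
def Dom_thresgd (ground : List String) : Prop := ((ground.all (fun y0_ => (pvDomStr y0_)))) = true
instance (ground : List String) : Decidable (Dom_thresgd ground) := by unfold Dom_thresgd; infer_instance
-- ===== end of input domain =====

-- B replaces the per-threshold 1/0 comparison loop by a hand-written binary search for the
-- cutoff k over the sorted thresholds, then builds the row as k ones followed by 5-k zeros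
-- (objective: alternative decomposition, same cost).

-- Python's lexicographic string comparison over code points (shared comparison primitive,
-- exact on all inputs; Lean's own String order is kernel-opaque, so it is ported by hand).
def pyStrLt : List Char → List Char → Bool
  | [], [] => false
  | [], _ :: _ => true
  | _ :: _, [] => false
  | x :: xs, y :: ys => x < y || (x == y && pyStrLt xs ys)

-- Python's  a >= b  on strings.
def pyStrGe (a b : String) : Bool := !(pyStrLt a.toList b.toList)

-- ===== PORT A =====
def thresgd (ground : List String) : List (List Int) :=
  ground.foldl (fun thrld i =>
    thrld ++ [(["4", "5", "6", "7", "8"] : List String).foldl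
      (fun eachthr j => eachthr ++ [if pyStrGe i j then (1 : Int) else 0]) []]) []

-- ===== PORT B =====
-- the while-loop binary search of Source B (bisect_right over the fixed threshold list)
def bsr (i : String) (lo hi : Int) : Int :=
  if h : lo < hi then
    let mid := PySem.Int.floordiv (lo + hi) 2
    if pyStrGe i (PySem.List.pyGetD ["4", "5", "6", "7", "8"] mid "") then
      bsr i (mid + 1) hi
    else
      bsr i lo mid
  else lo
termination_by (hi - lo).toNat
decreasing_by
  · have h1 : lo ≤ PySem.Int.floordiv (lo + hi) 2 :=
      (PySem.Int.le_floordiv_iff_mul_le (by omega)).mpr (by omega)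
    omega
  · have h2 : PySem.Int.floordiv (lo + hi) 2 < hi :=
      (PySem.Int.floordiv_lt_iff_lt_mul (by omega)).mpr (by omega)
    omega

def thresgd_alt (ground : List String) : List (List Int) :=
  ground.foldl (fun thrld i =>
    let lo := bsr i 0 5
    thrld ++ [List.replicate lo.toNat (1 : Int) ++ List.replicate (5 - lo).toNat (0 : Int)]) []

-- ===== PRECONDITION & SPEC =====
def Spec_thresgd (ground : List String) (out : List (List Int)) : Prop := out = thresgd_alt ground
instance (ground : List String) (out : List (List Int)) : Decidable (Spec_thresgd ground out) := by unfold Spec_thresgd; infer_instance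

-- ===== CLAIM (what is proved, stated in full; the proofs are below) =====
def Claim_equal_thresgd : Prop := ∀ (ground : List String), Dom_thresgd ground → Spec_thresgd ground (thresgd ground)

-- ===== LEMMAS AND PROOFS =====

theorem pyStrLt_nil_right (xs : List Char) : pyStrLt xs [] = false := by
  cases xs <;> rfl

theorem bsr_eval (i : String) :
    bsr i 0 5 = if pyStrGe i "6" then (if pyStrGe i "8" then 5 else if pyStrGe i "7" then 4 else 3)
      else (if pyStrGe i "5" then 2 else if pyStrGe i "4" then 1 else 0) := by
  rw [bsr]
  norm_num [PySem.Int.floordiv, PySem.List.pyGetD]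
  by_cases h6 : pyStrGe i "6" = true <;>
    by_cases h8 : pyStrGe i "8" = true <;>
      by_cases h7 : pyStrGe i "7" = true <;>
        by_cases h5 : pyStrGe i "5" = true <;>
          by_cases h4 : pyStrGe i "4" = true <;>
  simp [bsr, PySem.Int.floordiv, PySem.List.pyGetD, h4, h5, h6, h7, h8]

theorem per_elem (i : String) :
    (["4", "5", "6", "7", "8"] : List String).foldl
      (fun eachthr j => eachthr ++ [if pyStrGe i j then (1 : Int) else 0]) []
    = List.replicate (bsr i 0 5).toNat (1 : Int)
      ++ List.replicate (5 - bsr i 0 5).toNat (0 : Int) := by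
  rw [bsr_eval]
  cases hL : i.toList with
  | nil =>
      have g : ∀ t : String, pyStrGe i t = !(pyStrLt [] t.toList) := by
        intro t; unfold pyStrGe; rw [hL]
      simp [List.foldl, g, pyStrLt]
  | cons c rest =>
      have g4 : pyStrGe i "4" = !(c < '4') := by
        unfold pyStrGe; rw [hL]; simp [pyStrLt, pyStrLt_nil_right]
      have g5 : pyStrGe i "5" = !(c < '5') := by
        unfold pyStrGe; rw [hL]; simp [pyStrLt, pyStrLt_nil_right]
      have g6 : pyStrGe i "6" = !(c < '6') := by
        unfold pyStrGe; rw [hL]; simp [pyStrLt, pyStrLt_nil_right]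
      have g7 : pyStrGe i "7" = !(c < '7') := by
        unfold pyStrGe; rw [hL]; simp [pyStrLt, pyStrLt_nil_right]
      have g8 : pyStrGe i "8" = !(c < '8') := by
        unfold pyStrGe; rw [hL]; simp [pyStrLt, pyStrLt_nil_right]
      simp only [List.foldl, g4, g5, g6, g7, g8]
      by_cases h4 : c < '4' <;> by_cases h5 : c < '5' <;> by_cases h6 : c < '6' <;>
        by_cases h7 : c < '7' <;> by_cases h8 : c < '8' <;>
        first
        | (exact absurd (lt_trans h4 (by decide : ('4':Char) < '5')) h5)
        | (exact absurd (lt_trans h5 (by decide : ('5':Char) < '6')) h6)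
        | (exact absurd (lt_trans h6 (by decide : ('6':Char) < '7')) h7)
        | (exact absurd (lt_trans h7 (by decide : ('7':Char) < '8')) h8)
        | simp [h4, h5, h6, h7, h8, List.replicate]

-- ===== VERDICT (by name: the statement is the Claim_ definition above) =====
theorem thresgd_spec : Claim_equal_thresgd := by
  intro ground _
  unfold Spec_thresgd thresgd thresgd_alt
  simp only [PySem.List.foldl_append_singleton_eq_map]
  exact List.map_congr_left (fun i _ => per_elem i)
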